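-- pv_equiv track=rewrite | github.com/chloeboireaudevier/AOC-2024 | jour1.py | sim_score
-- ===== SOURCE A (Python) =====
-- def sim_score(col1,col2):
--     tabscore = []
--     similarity_score = 0
--     for i in range(len(col1)):
--         appear = col2.count(col1[i])
--         tabscore.append(col1[i]*appear)
--     similarity_score = sum(tabscore)
--     return similarity_score
-- ===== SOURCE B (Python) =====
-- def sim_score(col1, col2):
--     a = sorted(col1)
--     b = sorted(col2)
--     la, lb = len(a), len(b)
--     total = 0
--     i = 0
--     j = 0
--     while i < la and j < lb:
--         if a[i] < b[j]:
--             i += 1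
--         elif b[j] < a[i]:
--             j += 1
--         else:
--             v = a[i]
--             i2 = i
--             while i2 < la and a[i2] == v:
--                 i2 += 1
--             j2 = j
--             while j2 < lb and b[j2] == v:
--                 j2 += 1
--             total += v * (i2 - i) * (j2 - j)
--             i, j = i2, j2
--     return total
-- ===== Notes on version B (the rewrite author's own statement) =====
-- stated objective: faster
-- what changed: Sorts both lists and replaces A's per-element col2.count rescan by a two-pointer run-merge over the sorted lists, adding v*(run length in col1)*(run length in col2) for each shared value.
import Mathlib
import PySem

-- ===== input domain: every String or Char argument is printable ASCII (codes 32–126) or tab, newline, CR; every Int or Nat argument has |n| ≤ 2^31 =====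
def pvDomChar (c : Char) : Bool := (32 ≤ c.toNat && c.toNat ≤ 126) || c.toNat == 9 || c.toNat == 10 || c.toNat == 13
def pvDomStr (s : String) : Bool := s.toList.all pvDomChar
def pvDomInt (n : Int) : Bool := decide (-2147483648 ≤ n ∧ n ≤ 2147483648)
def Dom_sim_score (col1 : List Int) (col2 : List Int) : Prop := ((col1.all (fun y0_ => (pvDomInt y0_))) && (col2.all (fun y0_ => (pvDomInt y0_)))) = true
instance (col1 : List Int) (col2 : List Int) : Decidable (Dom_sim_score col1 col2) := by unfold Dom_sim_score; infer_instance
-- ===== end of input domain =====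

-- B sorts both lists and does a two-pointer run-merge over the sorted lists instead of A's per-element col2.count rescan.

-- ===== PORT A =====
def sim_score (col1 : List Int) (col2 : List Int) : Int :=
  let tabscore : List Int :=
    (PySem.List.pyRange 0 (col1.length : Int) 1).foldl
      (fun ts i =>
        let appear : Int := (PySem.List.count col2 (PySem.List.pyGetD col1 i 0) : Int)
        ts ++ [PySem.List.pyGetD col1 i 0 * appear]) []
  tabscore.sum

-- ===== PORT B =====
-- the two-pointer while loop of Source B: each step either advances past the
-- smaller head, or (equal heads) measures the run of that value in both
-- lists (the inner while loops) and skips both runs at once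
def mergeScore : List Int → List Int → Int
  | [], _ => 0
  | _ :: _, [] => 0
  | a :: as, b :: bs =>
    if a < b then mergeScore as (b :: bs)
    else if b < a then mergeScore (a :: as) bs
    else
      let ca := ((a :: as).takeWhile (fun x => x == a)).length
      let cb := ((b :: bs).takeWhile (fun x => x == a)).length
      a * (ca : Int) * (cb : Int) + mergeScore ((a :: as).drop ca) ((b :: bs).drop cb)
termination_by a b => a.length + b.length
decreasing_by
  all_goals
    simp only [List.length_drop, List.length_cons, List.takeWhile_cons, beq_self_eq_true,
      if_true]
    omega

def sim_score_alt (col1 : List Int) (col2 : List Int) : Int :=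
  mergeScore (PySem.List.sorted col1 (fun x => x) false) (PySem.List.sorted col2 (fun x => x) false)

-- ===== PRECONDITION & SPEC =====
def Spec_sim_score (col1 : List Int) (col2 : List Int) (out : Int) : Prop := out = sim_score_alt col1 col2
instance (col1 : List Int) (col2 : List Int) (out : Int) : Decidable (Spec_sim_score col1 col2 out) := by unfold Spec_sim_score; infer_instance

-- ===== CLAIM (what is proved, stated in full; the proofs are below) =====
def Claim_equal_sim_score : Prop := ∀ (col1 : List Int) (col2 : List Int), Dom_sim_score col1 col2 → Spec_sim_score col1 col2 (sim_score col1 col2)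

-- ===== LEMMAS AND PROOFS =====

-- A's value: the per-element sum over col1
lemma sim_score_eq (col1 col2 : List Int) :
    sim_score col1 col2 = (col1.map (fun x => x * (col2.count x : Int))).sum := by
  unfold sim_score
  simp only []
  rw [PySem.List.foldl_pyRange_zero_pyGetD' col1 0
    (fun ts v => ts ++ [v * (PySem.List.count col2 v : Int)]) []]
  rw [PySem.List.foldl_append_singleton_eq_map]
  simp [PySem.List.count_eq]

-- in a sorted list bounded below by v, the front run of v's is all the v's
lemma takeWhile_count (v : Int) (l : List Int) (hl : l.Pairwise (· ≤ ·))
    (hv : ∀ x ∈ l, v ≤ x) :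
    (l.takeWhile (fun x => x == v)).length = l.count v := by
  induction l with
  | nil => simp
  | cons c cs ih =>
    by_cases hc : c = v
    · subst hc
      simp only [List.takeWhile_cons, beq_self_eq_true, if_true, List.length_cons,
        List.count_cons_self]
      rw [ih hl.of_cons (fun x hx => hv x (List.mem_cons_of_mem _ hx))]
    · have hvc : v < c := lt_of_le_of_ne (hv c (List.mem_cons_self)) (Ne.symm hc)
      have hnot : v ∉ c :: cs := by
        intro hmem
        rcases List.mem_cons.mp hmem with h | h
        · exact hc h.symm
        · exact absurd (List.rel_of_pairwise_cons hl h) (by omega)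
      rw [List.count_eq_zero.mpr hnot]
      simp [hc]

-- after dropping the front run of v's from a sorted list bounded below by v,
-- every remaining element exceeds v
lemma dropWhile_gt (v : Int) (l : List Int) (hl : l.Pairwise (· ≤ ·))
    (hv : ∀ x ∈ l, v ≤ x) :
    ∀ x ∈ l.dropWhile (fun x => x == v), v < x := by
  induction l with
  | nil => simp
  | cons c cs ih =>
    by_cases hc : c = v
    · subst hc
      simp only [List.dropWhile_cons, beq_self_eq_true, if_true]
      exact ih hl.of_cons (fun x hx => hv x (List.mem_cons_of_mem _ hx))
    · have hvc : v < c := lt_of_le_of_ne (hv c (List.mem_cons_self)) (Ne.symm hc)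
      simp only [List.dropWhile_cons, beq_iff_eq, hc, if_false]
      intro x hx
      rcases List.mem_cons.mp hx with h | h
      · omega
      · have := List.rel_of_pairwise_cons hl h; omega

-- dropping the length of the takeWhile prefix is dropWhile
lemma drop_len_takeWhile {A : Type} (p : A → Bool) (l : List A) :
    l.drop (l.takeWhile p).length = l.dropWhile p := by
  induction l with
  | nil => simp
  | cons c cs ih =>
    by_cases h : p c
    · simp [h, ih]
    · simp [h]

-- the merge over two sorted lists computes the per-element weighted sum
lemma mergeScore_eq (a b : List Int) :
    a.Pairwise (· ≤ ·) → b.Pairwise (· ≤ ·) →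
    mergeScore a b = (a.map (fun x => x * (b.count x : Int))).sum := by
  induction a, b using mergeScore.induct with
  | case1 b => intro _ _; simp [mergeScore]
  | case2 a as => intro _ _; simp [mergeScore]
  | case3 a as b bs h ih =>
    intro ha hb
    have hcnt : (b :: bs).count a = 0 := by
      apply List.count_eq_zero.mpr
      intro hmem
      rcases List.mem_cons.mp hmem with hh | hh
      · omega
      · have := List.rel_of_pairwise_cons hb hh; omega
    rw [mergeScore, if_pos h, ih ha.of_cons hb]
    simp [hcnt]
  | case4 a as b bs h1 h2 ih =>
    intro ha hb
    rw [mergeScore, if_neg h1, if_pos h2, ih ha hb.of_cons]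
    congr 1
    apply List.map_congr_left
    intro x hx
    have hbx : b < x := by
      rcases List.mem_cons.mp hx with hh | hh
      · omega
      · have := List.rel_of_pairwise_cons ha hh; omega
    rw [List.count_cons, if_neg (by simp; omega)]
    simp
  | case5 a as b bs h1 h2 ca cb ih =>
    intro ha hb
    have hab : a = b := by omega
    subst hab
    -- run / rest decomposition of both lists
    have hge_a : ∀ x ∈ a :: as, a ≤ x := by
      intro x hx
      rcases List.mem_cons.mp hx with hh | hh
      · omega
      · exact List.rel_of_pairwise_cons ha hh
    have hge_b : ∀ x ∈ a :: bs, a ≤ x := by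
      intro x hx
      rcases List.mem_cons.mp hx with hh | hh
      · omega
      · exact List.rel_of_pairwise_cons hb hh
    have hca : ca = ((a :: as).takeWhile (fun x => x == a)).length := rfl
    have hcb : cb = ((a :: bs).takeWhile (fun x => x == a)).length := rfl
    have hdropa : (a :: as).drop ca = (a :: as).dropWhile (fun x => x == a) := by
      rw [hca]; exact drop_len_takeWhile _ _
    have hdropb : (a :: bs).drop cb = (a :: bs).dropWhile (fun x => x == a) := by
      rw [hcb]; exact drop_len_takeWhile _ _
    have hpa : ((a :: as).dropWhile (fun x => x == a)).Pairwise (· ≤ ·) :=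
      ha.sublist (List.dropWhile_sublist _)
    have hpb : ((a :: bs).dropWhile (fun x => x == a)).Pairwise (· ≤ ·) :=
      hb.sublist (List.dropWhile_sublist _)
    rw [hdropa, hdropb] at ih
    rw [mergeScore, if_neg h1, if_neg h2]
    show a * (ca : Int) * (cb : Int) + mergeScore ((a :: as).drop ca) ((a :: bs).drop cb) = _
    rw [hdropa, hdropb, ih hpa hpb]
    -- decompose the RHS along the run of a's in (a :: as)
    conv_rhs => rw [← List.takeWhile_append_dropWhile (p := fun x => x == a) (l := a :: as)]
    rw [List.map_append, List.sum_append]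
    congr 1
    · -- the run contributes a * ca * cb
      have hcb2 : cb = (a :: bs).count a := by
        rw [hcb]; exact takeWhile_count a (a :: bs) hb hge_b
      have hall : ∀ y ∈ ((a :: as).takeWhile (fun x => x == a)).map
          (fun x => x * ((a :: bs).count x : Int)), y = a * ((a :: bs).count a : Int) := by
        intro y hy
        rcases List.mem_map.mp hy with ⟨x, hx, rfl⟩
        have : x = a := by simpa using List.mem_takeWhile_imp hx
        rw [this]
      rw [List.sum_eq_card_nsmul _ _ hall]
      simp only [List.length_map]
      rw [← hca, hcb2]
      ring
    · -- the rest: counts in (a :: bs) and in its a-run-dropped tail agree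
      congr 1
      apply List.map_congr_left
      intro x hx
      have hxa : a < x := dropWhile_gt a (a :: as) ha hge_a x hx
      congr 1
      have hsplit : (a :: bs).count x
          = ((a :: bs).takeWhile (fun y => y == a)).count x
            + ((a :: bs).dropWhile (fun y => y == a)).count x := by
        conv_lhs => rw [← List.takeWhile_append_dropWhile (p := fun y => y == a) (l := a :: bs)]
        exact List.count_append
      have htw : ((a :: bs).takeWhile (fun y => y == a)).count x = 0 := by
        apply List.count_eq_zero.mpr
        intro hmem
        have : x = a := by simpa using List.mem_takeWhile_imp hmem
        omega
      omega

-- ===== VERDICT (by name: the statement is the Claim_ definition above) =====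
theorem sim_score_spec : Claim_equal_sim_score := by
  intro col1 col2 _
  show sim_score col1 col2 = sim_score_alt col1 col2
  unfold sim_score_alt
  rw [mergeScore_eq _ _ (PySem.List.sorted_pairwise col1 (fun x => x))
        (PySem.List.sorted_pairwise col2 (fun x => x)),
      sim_score_eq]
  have hperm : (PySem.List.sorted col1 (fun x => x) false).Perm col1 :=
    PySem.List.sorted_perm col1 (fun x => x) false
  have hperm2 : (PySem.List.sorted col2 (fun x => x) false).Perm col2 :=
    PySem.List.sorted_perm col2 (fun x => x) false
  calc ((col1.map (fun x => x * ((col2.count x : Nat) : Int))).sum)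
      = ((PySem.List.sorted col1 (fun x => x) false).map
          (fun x => x * ((col2.count x : Nat) : Int))).sum :=
        ((hperm.map _).sum_eq).symm
    _ = _ := by
        congr 1
        apply List.map_congr_left
        intro x _
        rw [hperm2.count_eq]
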